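-- pv_equiv track=rewrite | github.com/ColeZenk/SD403_TrailCamera_NDSU | sim/wht_sim.py | hadamard_matrix
-- ===== SOURCE A (Python) =====
-- def hadamard_matrix(N):
--     if N == 1:
--         return [[1]]
--     half = hadamard_matrix(N >> 1)
--     H = []
--     for row in half:
--         H.append(row + row)
--     for row in half:
--         H.append(row + [-x for x in row])
--     return H
-- ===== SOURCE B (Python) =====
-- def hadamard_matrix(N):
--     # M = largest power of two not exceeding N (the dimension A's halving recursion yields)
--     M = 1
--     while M * 2 <= N:
--         M *= 2
--     # sign[x] = (-1)**popcount(x); doubling the table flips the sign for the new top bit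
--     sign = [1]
--     while len(sign) < M:
--         sign = sign + [-s for s in sign]
--     # closed-form Walsh/Sylvester entry: H[i][j] = (-1)**popcount(i & j)
--     return [[sign[i & j] for j in range(M)] for i in range(M)]
-- ===== Notes on version B (the rewrite author's own statement) =====
-- stated objective: alternative
-- what changed: Replaces the recursive 2-D block-doubling by the closed-form Walsh entry H[i][j] = (-1)**popcount(i & j): it computes M = largest power of two <= N, builds a 1-D popcount-parity sign table, and fills the matrix directly by indexing it with i & j.
-- outside the precondition, e.g. on hadamard_matrix(0): A raises RecursionError, B returns [[1]]; on hadamard_matrix(-1): A raises RecursionError, B returns [[1]]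
import Mathlib
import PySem

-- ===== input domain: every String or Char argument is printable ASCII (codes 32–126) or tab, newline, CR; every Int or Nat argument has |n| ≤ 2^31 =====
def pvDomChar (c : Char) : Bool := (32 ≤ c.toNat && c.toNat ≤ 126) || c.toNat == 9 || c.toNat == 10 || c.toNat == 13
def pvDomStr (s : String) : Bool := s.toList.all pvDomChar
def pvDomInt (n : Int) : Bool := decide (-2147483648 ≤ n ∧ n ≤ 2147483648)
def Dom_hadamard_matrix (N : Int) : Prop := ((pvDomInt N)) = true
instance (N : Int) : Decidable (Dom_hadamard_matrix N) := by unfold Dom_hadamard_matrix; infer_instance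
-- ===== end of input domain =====

-- B replaces A's recursive 2-D block-doubling by the closed-form Walsh entry
-- H[i][j] = (-1)^popcount(i & j), read off a 1-D popcount-parity table of size
-- M = the largest power of two ≤ N (an alternative algorithm, not claimed faster).

-- ===== PORT A =====
-- A recurses on N >> 1 until N == 1; the Nat fuel argument is a totality guard only
-- (fuel 0 is never reached when 1 ≤ N and fuel > N.toNat).
def hadRecA : Nat → Int → List (List Int)
  | 0, _ => []
  | fuel + 1, N =>
    if N = 1 then [[1]]
    else
      let half := hadRecA fuel (N >>> (1 : Nat))   -- Python N >> 1 is Lean's >>> on Int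
      (half.map fun row => row ++ row) ++
        (half.map fun row => row ++ row.map (fun x => -x))

def hadamard_matrix (N : Int) : List (List Int) := hadRecA (N.toNat + 1) N

-- ===== PORT B =====
-- while M * 2 <= N: M *= 2   (fuel is a totality guard only; the loop exits before it runs out)
def growM : Nat → Int → Int → Int
  | 0, M, _ => M
  | fuel + 1, M, N => if M * 2 ≤ N then growM fuel (M * 2) N else M

-- while len(sign) < M: sign = sign + [-s for s in sign]   (fuel is a totality guard only)
def growSign : Nat → Int → List Int → List Int
  | 0, _, sign => sign
  | fuel + 1, M, sign =>
      if (sign.length : Int) < M then growSign fuel M (sign ++ sign.map (fun s => -s))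
      else sign

-- [[sign[i & j] for j in range(M)] for i in range(M)]
def walshMat (M : Int) (sign : List Int) : List (List Int) :=
  (PySem.List.pyRange 0 M 1).map (fun i =>
    (PySem.List.pyRange 0 M 1).map (fun j =>
      PySem.List.pyGetD sign (PySem.Int.band i j) 0))

def hadamard_matrix_alt (N : Int) : List (List Int) :=
  let M := growM (N.toNat + 1) 1 N
  walshMat M (growSign (N.toNat + 1) M [1])

-- ===== PRECONDITION & SPEC =====
-- Pre_ excludes N ≤ 0, on which the Python A recurses on N >> 1 forever (RecursionError).
def Pre_hadamard_matrix (N : Int) : Prop := 1 ≤ N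
instance (N : Int) : Decidable (Pre_hadamard_matrix N) := by unfold Pre_hadamard_matrix; infer_instance
def pvWitness_hadamard_matrix : Int := (4)

def Spec_hadamard_matrix (N : Int) (out : List (List Int)) : Prop := out = hadamard_matrix_alt N
instance (N : Int) (out : List (List Int)) : Decidable (Spec_hadamard_matrix N out) := by unfold Spec_hadamard_matrix; infer_instance

-- ===== CLAIM (what is proved, stated in full; the proofs are below) =====
def Claim_equal_hadamard_matrix : Prop := ∀ (N : Int), Dom_hadamard_matrix N → Pre_hadamard_matrix N → Spec_hadamard_matrix N (hadamard_matrix N)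

-- ===== LEMMAS AND PROOFS =====

-- The Sylvester doubling shape of A, indexed by the exponent (proof-side helper).
def Syl : Nat → List (List Int)
  | 0 => [[1]]
  | k + 1 =>
      ((Syl k).map fun row => row ++ row) ++
        ((Syl k).map fun row => row ++ row.map (fun x => -x))

-- B's sign value and entry, on Nat indices.
def ent1 (x : Nat) : Int := if PySem.Int.bitCount ((x : Nat) : Int) % 2 = 0 then 1 else -1

def entN (i j : Nat) : Int := ent1 (i &&& j)

def formRow (k i : Nat) : List Int := (List.range (2 ^ k)).map (entN i)

-- ---- arithmetic on Int >>> 1 ----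
theorem shiftRight_one_natCast (m : Nat) : (m : Int) >>> (1 : Nat) = ((m / 2 : Nat) : Int) := by
  simp [Int.shiftRight_eq_div_pow]

-- ---- A-side: the fuel recursion computes Syl (log2 n) ----
theorem hadRecA_eq (fuel n : Nat) (h1 : 1 ≤ n) (hf : n ≤ fuel) :
    hadRecA fuel (n : Int) = Syl (Nat.log2 n) := by
  induction fuel generalizing n with
  | zero => omega
  | succ fuel ih =>
    by_cases h : n = 1
    · subst h
      simp [hadRecA, Syl, Nat.log2]
    · have h2 : 2 ≤ n := by omega
      have hne : (n : Int) ≠ 1 := by exact_mod_cast h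
      have hrec : hadRecA fuel ((n : Int) >>> (1 : Nat)) = Syl (Nat.log2 (n / 2)) := by
        rw [shiftRight_one_natCast]
        exact ih (n / 2) (by omega) (by omega)
      have hlog : Nat.log2 n = Nat.log2 (n / 2) + 1 := by
        rw [Nat.log2_def]; simp [h2]
      simp only [hadRecA, if_neg hne, hrec, hlog, Syl]

-- ---- B-side: the grow loop computes 2 ^ log2 ----
theorem growM_eq (fuel m n : Nat) (h1 : 1 ≤ m) (hmn : m ≤ n) (hf : n / m < 2 ^ fuel) :
    growM fuel (m : Int) (n : Int) = ((m * 2 ^ Nat.log2 (n / m) : Nat) : Int) := by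
  induction fuel generalizing m with
  | zero =>
    exfalso
    have : 1 ≤ n / m := Nat.one_le_div_iff (by omega) |>.mpr hmn
    omega
  | succ fuel ih =>
    by_cases h : m * 2 ≤ n
    · have hcond : (m : Int) * 2 ≤ (n : Int) := by exact_mod_cast h
      have h2 : 2 ≤ n / m := (Nat.le_div_iff_mul_le (by omega)).mpr (by omega)
      have hstep : (m : Int) * 2 = ((m * 2 : Nat) : Int) := by push_cast; ring
      have hdiv : n / (m * 2) = n / m / 2 := by
        rw [Nat.div_div_eq_div_mul]
      have hrec := ih (m * 2) (by omega) (by omega) (by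
        rw [hdiv]; omega)
      have hlog : Nat.log2 (n / m) = Nat.log2 (n / m / 2) + 1 := by
        rw [Nat.log2_def]; simp [h2]
      simp only [growM]
      rw [if_pos hcond, hstep, hrec, hdiv, hlog]
      push_cast; ring
    · have hcond : ¬ (m : Int) * 2 ≤ (n : Int) := by exact_mod_cast h
      have hq : n / m = 1 := by
        have hlo : 1 ≤ n / m := Nat.one_le_div_iff (by omega) |>.mpr hmn
        have hhi : n / m < 2 := Nat.div_lt_of_lt_mul (by omega)
        omega
      have hl1 : Nat.log2 1 = 0 := rfl
      simp [growM, if_neg hcond, hq, hl1]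

-- ---- bit lemmas for the Walsh entry ----
theorem land_two_pow_add_left {k a b : Nat} (ha : a < 2 ^ k) (hb : b < 2 ^ k) :
    (2 ^ k + a) &&& b = a &&& b := by
  apply Nat.eq_of_testBit_eq
  intro i
  rcases lt_trichotomy i k with hik | hik | hik
  · simp [Nat.testBit_and, Nat.testBit_two_pow_add_gt hik]
  · subst hik
    have hbk : b.testBit i = false := Nat.testBit_lt_two_pow hb
    simp [Nat.testBit_and, hbk]
  · have hlt : 2 ^ k + a < 2 ^ i := by
      have : 2 ^ (k + 1) ≤ 2 ^ i := Nat.pow_le_pow_right (by omega) (by omega)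
      have := Nat.pow_succ 2 k
      omega
    have h1 : (2 ^ k + a).testBit i = false := Nat.testBit_lt_two_pow hlt
    have h2 : a.testBit i = false := Nat.testBit_lt_two_pow (by
      have : 2 ^ k ≤ 2 ^ i := Nat.pow_le_pow_right (by omega) (by omega)
      omega)
    simp [Nat.testBit_and, h1, h2]

theorem land_two_pow_add_both {k a b : Nat} (ha : a < 2 ^ k) (hb : b < 2 ^ k) :
    (2 ^ k + a) &&& (2 ^ k + b) = 2 ^ k + (a &&& b) := by
  apply Nat.eq_of_testBit_eq
  intro i
  rcases lt_trichotomy i k with hik | hik | hik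
  · simp [Nat.testBit_and, Nat.testBit_two_pow_add_gt hik]
  · subst hik
    have hab : (a &&& b) < 2 ^ i := Nat.and_lt_two_pow a hb
    have h1 : a.testBit i = false := Nat.testBit_lt_two_pow ha
    have h2 : b.testBit i = false := Nat.testBit_lt_two_pow hb
    simp [Nat.testBit_and, Nat.testBit_two_pow_add_eq, h1, h2,
      Nat.testBit_lt_two_pow hab]
  · have hle : 2 ^ (k + 1) ≤ 2 ^ i := Nat.pow_le_pow_right (by omega) (by omega)
    have hps := Nat.pow_succ 2 k
    have hab : (a &&& b) < 2 ^ k := Nat.and_lt_two_pow a hb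
    have h1 : (2 ^ k + a).testBit i = false := Nat.testBit_lt_two_pow (by omega)
    have h2 : (2 ^ k + b).testBit i = false := Nat.testBit_lt_two_pow (by omega)
    have h3 : (2 ^ k + (a &&& b)).testBit i = false := Nat.testBit_lt_two_pow (by omega)
    simp [Nat.testBit_and, h1, h2, h3]

theorem bitCount_add_two_pow {k x : Nat} (hx : x < 2 ^ k) :
    PySem.Int.bitCount ((x + 2 ^ k : Nat) : Int) = PySem.Int.bitCount ((x : Nat) : Int) + 1 := by
  induction k generalizing x with
  | zero =>
    interval_cases x
    decide
  | succ k ih =>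
    have hpos : 0 < x + 2 ^ (k + 1) := by positivity
    rw [PySem.Int.bitCount_natCast hpos]
    have hmod : (x + 2 ^ (k + 1)) % 2 = x % 2 := by
      have : 2 ^ (k + 1) % 2 = 0 := by
        simp [Nat.pow_succ]
      omega
    have hdiv : (x + 2 ^ (k + 1)) / 2 = x / 2 + 2 ^ k := by
      have h2 : 2 ^ (k + 1) = 2 ^ k * 2 := Nat.pow_succ 2 k
      omega
    rw [hmod, hdiv, ih (by
      have h2 : 2 ^ (k + 1) = 2 ^ k * 2 := Nat.pow_succ 2 k
      omega)]
    by_cases hx0 : x = 0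
    · subst hx0; simp
    · rw [PySem.Int.bitCount_natCast (show 0 < x by omega)]
      omega

theorem ent1_add_two_pow {k x : Nat} (hx : x < 2 ^ k) :
    ent1 (x + 2 ^ k) = - ent1 x := by
  unfold ent1
  rw [bitCount_add_two_pow hx]
  rcases Nat.even_or_odd (PySem.Int.bitCount ((x : Nat) : Int)) with he | ho
  · have h0 : PySem.Int.bitCount ((x : Nat) : Int) % 2 = 0 := Nat.even_iff.mp he
    have h1 : (PySem.Int.bitCount ((x : Nat) : Int) + 1) % 2 = 1 := by omega
    simp [h0, h1]
  · have h0 : PySem.Int.bitCount ((x : Nat) : Int) % 2 = 1 := Nat.odd_iff.mp ho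
    have h1 : (PySem.Int.bitCount ((x : Nat) : Int) + 1) % 2 = 0 := by omega
    simp [h0, h1]

theorem entN_top_right {k i j : Nat} (hi : i < 2 ^ k) (hj : j < 2 ^ k) :
    entN i (2 ^ k + j) = entN i j := by
  unfold entN
  rw [Nat.and_comm i (2 ^ k + j), land_two_pow_add_left hj hi, Nat.and_comm j i]

theorem entN_bot_left {k i j : Nat} (hi : i < 2 ^ k) (hj : j < 2 ^ k) :
    entN (2 ^ k + i) j = entN i j := by
  unfold entN
  rw [land_two_pow_add_left hi hj]

theorem entN_bot_right {k i j : Nat} (hi : i < 2 ^ k) (hj : j < 2 ^ k) :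
    entN (2 ^ k + i) (2 ^ k + j) = - entN i j := by
  unfold entN
  rw [land_two_pow_add_both hi hj, Nat.add_comm (2 ^ k) (i &&& j)]
  exact ent1_add_two_pow (Nat.and_lt_two_pow i hj)

-- ---- the sign-table doubling loop computes ent1 on range (2 ^ K) ----
theorem growSign_eq (fuel k K : Nat) (hkK : k ≤ K) (hf : K - k ≤ fuel) :
    growSign fuel ((2 ^ K : Nat) : Int) ((List.range (2 ^ k)).map ent1) =
      (List.range (2 ^ K)).map ent1 := by
  induction fuel generalizing k with
  | zero =>
    have hk : k = K := by omega
    subst hk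
    simp [growSign]
  | succ fuel ih =>
    by_cases hlt : k < K
    · have hcond : ((((List.range (2 ^ k)).map ent1).length : Int) < ((2 ^ K : Nat) : Int)) := by
        simp only [List.length_map, List.length_range]
        exact_mod_cast Nat.pow_lt_pow_right (by omega) hlt
      have hdouble : (List.range (2 ^ k)).map ent1 ++ ((List.range (2 ^ k)).map ent1).map (fun s => -s)
          = (List.range (2 ^ (k + 1))).map ent1 := by
        rw [Nat.pow_succ, Nat.mul_two, List.range_add, List.map_append, List.map_map, List.map_map]
        congr 1
        apply List.map_congr_left
        intro x hx
        have hx' : x < 2 ^ k := List.mem_range.mp hx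
        simp only [Function.comp_def]
        rw [Nat.add_comm (2 ^ k) x, ent1_add_two_pow hx']
      rw [growSign, if_pos hcond, hdouble]
      exact ih (k + 1) (by omega) (by omega)
    · have hk : k = K := by omega
      subst hk
      rw [growSign, if_neg (by simp)]

-- ---- the closed-form matrix satisfies the Sylvester recursion ----
theorem form_eq_syl (k : Nat) :
    (List.range (2 ^ k)).map (formRow k) = Syl k := by
  induction k with
  | zero => decide
  | succ k ih =>
    have hsplit : List.range (2 ^ (k + 1)) =
        List.range (2 ^ k) ++ (List.range (2 ^ k)).map (fun i => 2 ^ k + i) := by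
      rw [Nat.pow_succ, Nat.mul_two, List.range_add]
    have hrow_top : ∀ i ∈ List.range (2 ^ k),
        formRow (k + 1) i = formRow k i ++ formRow k i := by
      intro i hi
      have hi' : i < 2 ^ k := List.mem_range.mp hi
      unfold formRow
      rw [hsplit, List.map_append, List.map_map]
      congr 1
      apply List.map_congr_left
      intro j hj
      exact entN_top_right hi' (List.mem_range.mp hj)
    have hrow_bot : ∀ i ∈ List.range (2 ^ k),
        formRow (k + 1) (2 ^ k + i) = formRow k i ++ (formRow k i).map (fun x => -x) := by
      intro i hi
      have hi' : i < 2 ^ k := List.mem_range.mp hi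
      unfold formRow
      rw [hsplit, List.map_append, List.map_map, List.map_map]
      congr 1
      · apply List.map_congr_left
        intro j hj
        exact entN_bot_left hi' (List.mem_range.mp hj)
      · apply List.map_congr_left
        intro j hj
        exact entN_bot_right hi' (List.mem_range.mp hj)
    calc (List.range (2 ^ (k + 1))).map (formRow (k + 1))
        = (List.range (2 ^ k)).map (formRow (k + 1)) ++
            (List.range (2 ^ k)).map (fun i => formRow (k + 1) (2 ^ k + i)) := by
          rw [hsplit, List.map_append, List.map_map]; rfl
      _ = (List.range (2 ^ k)).map (fun i => formRow k i ++ formRow k i) ++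
            (List.range (2 ^ k)).map
              (fun i => formRow k i ++ (formRow k i).map (fun x => -x)) := by
          rw [List.map_congr_left hrow_top, List.map_congr_left hrow_bot]
      _ = Syl (k + 1) := by
          show _ = ((Syl k).map fun row => row ++ row) ++ _
          rw [← ih, List.map_map, List.map_map]; rfl

-- ---- B's port unfolds to the closed-form matrix of the computed size ----
theorem alt_eq_form (N : Int) (h1 : 1 ≤ N) :
    hadamard_matrix_alt N = (List.range (2 ^ Nat.log2 N.toNat)).map (formRow (Nat.log2 N.toNat)) := by
  have hN : ((N.toNat : Nat) : Int) = N := Int.toNat_of_nonneg (by omega)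
  have h1n : 1 ≤ N.toNat := by omega
  have hM : growM (N.toNat + 1) 1 N = ((2 ^ Nat.log2 N.toNat : Nat) : Int) := by
    have hbig : N.toNat / 1 < 2 ^ (N.toNat + 1) := by
      have h := Nat.lt_two_pow_self (n := N.toNat)
      have h2 : (2 : Nat) ^ N.toNat < 2 ^ (N.toNat + 1) :=
        Nat.pow_lt_pow_right (by omega) (by omega)
      rw [Nat.div_one]
      omega
    have := growM_eq (N.toNat + 1) 1 N.toNat (by omega) h1n hbig
    simpa [hN] using this
  have hsign : growSign (N.toNat + 1) ((2 ^ Nat.log2 N.toNat : Nat) : Int) [1] =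
      (List.range (2 ^ Nat.log2 N.toNat)).map ent1 := by
    have hbase : ([1] : List Int) = (List.range (2 ^ 0)).map ent1 := by decide
    rw [hbase]
    exact growSign_eq (N.toNat + 1) 0 (Nat.log2 N.toNat) (by omega)
      (by have := Nat.log2_le_self N.toNat; omega)
  simp only [hadamard_matrix_alt, walshMat]
  rw [hM, hsign, PySem.List.pyRange_one]
  simp only [sub_zero, Int.toNat_natCast, List.map_map, Function.comp_def, zero_add]
  apply List.map_congr_left
  intro i hi
  have hi' : i < 2 ^ Nat.log2 N.toNat := List.mem_range.mp hi
  unfold formRow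
  apply List.map_congr_left
  intro j hj
  have hj' : j < 2 ^ Nat.log2 N.toNat := List.mem_range.mp hj
  have hand : i &&& j < 2 ^ Nat.log2 N.toNat := Nat.and_lt_two_pow i hj'
  rw [show PySem.Int.band (i : Int) (j : Int) = ((i &&& j : Nat) : Int) from
    PySem.Int.band_natCast i j]
  rw [PySem.List.pyGetD_natCast]
  unfold entN
  rw [List.getD_eq_getElem _ _ (by simpa using hand)]
  simp

-- ===== VERDICT (by name: the statement is the Claim_ definition above) =====
theorem hadamard_matrix_spec : Claim_equal_hadamard_matrix := by
  intro N _ hpre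
  have h1 : (1 : Int) ≤ N := hpre
  have hN : ((N.toNat : Nat) : Int) = N := Int.toNat_of_nonneg (by omega)
  unfold Spec_hadamard_matrix
  rw [alt_eq_form N h1, form_eq_syl]
  have hA := hadRecA_eq (N.toNat + 1) N.toNat (by omega) (by omega)
  rw [hN] at hA
  unfold hadamard_matrix
  exact hA
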